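-- pv_equiv track=rewrite | github.com/jknight1725/asymptotic_analysis_table | Big_O_Table.py | n_factorial
-- ===== SOURCE A (Python) =====
-- def n_factorial(t):
--     i = 2
--     j = 1
--     c = 0
--     while j < t:
--         j *= i
--         i += 1
--         c += 1
--     return c
-- ===== SOURCE B (Python) =====
-- def _fact(n):
--     return 1 if n <= 1 else n * _fact(n - 1)
--
-- def n_factorial(t):
--     c = 0
--     while _fact(c + 1) < t:
--         c += 1
--     return c
-- ===== Notes on version B (the rewrite author's own statement) =====
-- stated objective: simpler
-- what changed: B drops A's running-product and step-index accumulators and instead searches for the first c with fact(c+1) >= t, recomputing the factorial via a recursive helper each step.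
import Mathlib
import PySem

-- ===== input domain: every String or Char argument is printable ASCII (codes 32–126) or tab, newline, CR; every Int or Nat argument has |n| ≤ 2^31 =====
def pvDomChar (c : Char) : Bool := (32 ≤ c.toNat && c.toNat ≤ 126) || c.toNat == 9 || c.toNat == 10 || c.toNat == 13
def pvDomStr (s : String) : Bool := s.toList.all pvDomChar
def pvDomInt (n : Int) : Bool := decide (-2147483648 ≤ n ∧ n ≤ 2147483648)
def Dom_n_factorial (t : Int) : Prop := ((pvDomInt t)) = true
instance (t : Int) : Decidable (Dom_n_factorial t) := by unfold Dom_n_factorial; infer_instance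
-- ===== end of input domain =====

-- B replaces A's running-product/step-index loop by a search for the first c with fact(c+1) ≥ t,
-- recomputing the factorial with a recursive helper each step (objective: simpler decomposition).

-- ===== PORT A =====
-- A's while loop: state (j,i,c); hypotheses 1 ≤ j, 2 ≤ i are invariants of A's loop, carried for termination.
def pvLoopA (t j i c : Int) (hj : 1 ≤ j) (hi : 2 ≤ i) : Int :=
  if h : j < t then
    pvLoopA t (j * i) (i + 1) (c + 1) (by nlinarith) (by omega)
  else c
termination_by (t - j).toNat
decreasing_by
  have : j + 1 ≤ j * i := by nlinarith
  omega

def n_factorial (t : Int) : Int := pvLoopA t 1 2 0 (by norm_num) (by norm_num)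

-- ===== PORT B =====
-- port of Source B's _fact (recursive factorial)
def pvFact (n : Int) : Int :=
  if n ≤ 1 then 1 else n * pvFact (n - 1)
termination_by n.toNat
decreasing_by omega

theorem pvFact_pos (n : Int) : 1 ≤ pvFact n := by
  by_cases h : n ≤ 1
  · rw [pvFact]; simp [h]
  · rw [pvFact]; simp only [h, if_false]
    have := pvFact_pos (n - 1)
    nlinarith
termination_by n.toNat
decreasing_by omega

-- Source B's while loop: counter c, hypothesis 0 ≤ c (invariant) carried for termination.
def pvLoopB (t c : Int) (hc : 0 ≤ c) : Int :=
  if h : pvFact (c + 1) < t then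
    pvLoopB t (c + 1) (by omega)
  else c
termination_by (t - pvFact (c + 1)).toNat
decreasing_by
  have h1 : 1 ≤ pvFact (c + 1) := pvFact_pos _
  have h2 : pvFact (c + 1 + 1) = (c + 2) * pvFact (c + 1) := by
    rw [pvFact]; simp only [show ¬(c + 1 + 1 ≤ 1) by omega, if_false]; ring_nf
  have : pvFact (c + 1) + 1 ≤ pvFact (c + 1 + 1) := by rw [h2]; nlinarith
  omega

def n_factorial_alt (t : Int) : Int := pvLoopB t 0 (by norm_num)

-- ===== PRECONDITION & SPEC =====
def Spec_n_factorial (t : Int) (out : Int) : Prop := out = n_factorial_alt t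
instance (t : Int) (out : Int) : Decidable (Spec_n_factorial t out) := by unfold Spec_n_factorial; infer_instance

-- ===== CLAIM (what is proved, stated in full; the proofs are below) =====
def Claim_equal_n_factorial : Prop := ∀ (t : Int), Dom_n_factorial t → Spec_n_factorial t (n_factorial t)

-- ===== LEMMAS AND PROOFS =====
theorem pvLoop_agree (t c : Int) (hc : 0 ≤ c) (hj : 1 ≤ pvFact (c + 1)) (hi : 2 ≤ c + 2) :
    pvLoopA t (pvFact (c + 1)) (c + 2) c hj hi = pvLoopB t c hc := by
  rw [pvLoopA, pvLoopB]
  by_cases h : pvFact (c + 1) < t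
  · simp only [h, dif_pos]
    have hstep : pvFact (c + 1) * (c + 2) = pvFact (c + 1 + 1) := by
      rw [show pvFact (c + 1 + 1) = if c + 1 + 1 ≤ 1 then 1 else (c + 1 + 1) * pvFact (c + 1 + 1 - 1) from by rw [pvFact]]
      simp only [show ¬(c + 1 + 1 ≤ 1) by omega, if_false]
      ring_nf
    have := pvLoop_agree t (c + 1) (by omega) (hstep ▸ (by nlinarith : (1:Int) ≤ pvFact (c+1) * (c+2))) (by omega)
    convert this using 2; omega
  · simp [h]
termination_by (t - pvFact (c + 1)).toNat
decreasing_by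
  have h2 : pvFact (c + 1 + 1) = (c + 2) * pvFact (c + 1) := by
    rw [pvFact]; simp only [show ¬(c + 1 + 1 ≤ 1) by omega, if_false]; ring_nf
  have : pvFact (c + 1) + 1 ≤ pvFact (c + 1 + 1) := by rw [h2]; nlinarith
  omega

-- ===== VERDICT (by name: the statement is the Claim_ definition above) =====
theorem n_factorial_spec : Claim_equal_n_factorial := by
  intro t _
  unfold Spec_n_factorial n_factorial n_factorial_alt
  have h1 : pvFact (0 + 1) = 1 := by rw [pvFact]; norm_num
  have := pvLoop_agree t 0 (by norm_num) (by rw [h1]) (by norm_num)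
  rw [← this]
  congr 1; rw [h1]
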